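-- pv_equiv track=rewrite | github.com/bksuh/code_practice | 프로그래머스/0/181880. 1로 만들기/1로 만들기.py | solution
-- ===== SOURCE A (Python) =====
-- def solution(num_list):
--     answer = 0
--     for num in num_list:
--         cnt = 0
--         while True:
--             if num == 1:
--                 answer += cnt
--                 break
--             if num% 2 == 0:
--                 num //= 2
--             else:
--                 num = (num-1)//2
--             cnt+=1
--
--     return answer
-- ===== SOURCE B (Python) =====
-- def solution(num_list):
--     # Closed form: halving n >= 1 down to 1 takes bit_length(n)-1 steps.
--     return sum(n.bit_length() - 1 for n in num_list)
-- ===== Notes on version B (the rewrite author's own statement) =====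
-- stated objective: simpler
-- what changed: Replaces the per-element halving while-loop with the closed form bit_length(n)-1 summed over the list.
import Mathlib
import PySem

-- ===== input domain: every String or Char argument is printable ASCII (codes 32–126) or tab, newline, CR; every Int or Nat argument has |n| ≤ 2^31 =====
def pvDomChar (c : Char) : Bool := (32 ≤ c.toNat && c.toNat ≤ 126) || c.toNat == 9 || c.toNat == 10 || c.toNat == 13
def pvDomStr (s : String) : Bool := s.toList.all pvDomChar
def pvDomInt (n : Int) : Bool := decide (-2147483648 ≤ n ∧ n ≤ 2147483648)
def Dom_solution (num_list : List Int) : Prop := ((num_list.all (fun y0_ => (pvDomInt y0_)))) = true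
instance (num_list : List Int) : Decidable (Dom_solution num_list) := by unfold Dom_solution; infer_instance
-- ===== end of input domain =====

-- B replaces A's per-element halving while-loop by the closed form bit_length(n)-1 summed over the list (objective: simpler).


-- ===== PORT A =====
-- A's inner 'while True' halving loop; diverges in Python for num ≤ 0 (excluded by Pre_).
-- The fuel argument only makes the recursion total: num.toNat steps suffice for num ≥ 1
-- (proved in solutionLoop_eq below), and fuel 0 is never reached inside Pre_.
def solutionLoop : Nat → Int → Int → Int
  | 0, _, _ => 0
  | fuel + 1, num, cnt =>
    if num = 1 then cnt
    else solutionLoop fuel (if PySem.Int.mod num 2 = 0 then PySem.Int.floordiv num 2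
                            else PySem.Int.floordiv (num - 1) 2) (cnt + 1)

def solution (num_list : List Int) : Int :=
  num_list.foldl (fun answer num => answer + solutionLoop num.toNat num 0) 0

-- ===== PORT B =====
def solution_alt (num_list : List Int) : Int :=
  (num_list.map (fun n => (PySem.Int.bitLength n : Int) - 1)).sum

-- ===== PRECONDITION & SPEC =====
-- Pre_ excludes nonpositive elements: on those A's while-loop never terminates (no return).
def Pre_solution (num_list : List Int) : Prop := ∀ n ∈ num_list, 1 ≤ n
instance (num_list : List Int) : Decidable (Pre_solution num_list) := by unfold Pre_solution; infer_instance
def pvWitness_solution : List Int := [1, 2, 7, 1000]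

def Spec_solution (num_list : List Int) (out : Int) : Prop := out = solution_alt num_list
instance (num_list : List Int) (out : Int) : Decidable (Spec_solution num_list out) := by unfold Spec_solution; infer_instance

-- ===== CLAIM (what is proved, stated in full; the proofs are below) =====
def Claim_equal_solution : Prop := ∀ (num_list : List Int), Dom_solution num_list → Pre_solution num_list → Spec_solution num_list (solution num_list)

-- ===== LEMMAS AND PROOFS =====
lemma solutionLoop_eq : ∀ (fuel : Nat) (num : Int), 1 ≤ num → num.toNat ≤ fuel → ∀ cnt : Int,
    solutionLoop fuel num cnt = cnt + (PySem.Int.bitLength num : Int) - 1 := by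
  intro fuel
  induction fuel with
  | zero => intro num h1 hf; omega
  | succ fuel ih =>
    intro num h1 hf cnt
    rw [solutionLoop]
    by_cases he : num = 1
    · subst he
      have hb : PySem.Int.bitLength 1 = 1 := by decide
      simp [hb]
    · simp only [he, if_false]
      have h2 : PySem.Int.floordiv num 2 = num / 2 := PySem.Int.floordiv_eq_ediv_of_pos (by omega)
      have h3 : PySem.Int.floordiv (num - 1) 2 = (num - 1) / 2 := PySem.Int.floordiv_eq_ediv_of_pos (by omega)
      have hstep : (if PySem.Int.mod num 2 = 0 then PySem.Int.floordiv num 2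
                     else PySem.Int.floordiv (num - 1) 2) = num / 2 := by
        have hm : PySem.Int.mod num 2 = num % 2 := PySem.Int.mod_eq_emod_of_pos (by omega)
        split <;> rename_i hc <;> rw [hm] at * <;> [exact h2; (rw [h3]; omega)]
      rw [hstep]
      have hhalf1 : 1 ≤ num / 2 := by omega
      have hfl : (num / 2).toNat ≤ fuel := by omega
      rw [ih _ hhalf1 hfl]
      have hb : PySem.Int.bitLength num = PySem.Int.bitLength (PySem.Int.floordiv num 2) + 1 :=
        PySem.Int.bitLength_of_pos (by omega)
      rw [h2] at hb
      rw [hb]; push_cast; ring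

-- ===== VERDICT (by name: the statement is the Claim_ definition above) =====
theorem solution_spec : Claim_equal_solution := by
  intro num_list _ hpre
  unfold Spec_solution solution solution_alt
  rw [PySem.List.foldl_add]
  simp only [zero_add]
  congr 1
  apply List.map_congr_left
  intro n hn
  rw [solutionLoop_eq n.toNat n (hpre n hn) le_rfl 0]
  ring
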